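-- pv_equiv track=rewrite | github.com/sharathadavanne/seld-dcase2020 | calculate_SELD_metrics.py | get_nb_files
-- ===== SOURCE A (Python) =====
-- def get_nb_files(_pred_file_list, _group='split'):
--     _group_ind = {'ir': 4, 'ov': 21}
--     _cnt_dict = {}
--     for _filename in _pred_file_list:
--
--         if _group == 'all':
--             _ind = 0
--         else:
--             _ind = int(_filename[_group_ind[_group]])
--
--         if _ind not in _cnt_dict:
--             _cnt_dict[_ind] = []
--         _cnt_dict[_ind].append(_filename)
--
--     return _cnt_dict
-- ===== SOURCE B (Python) =====
-- def get_nb_files(_pred_file_list, _group='split'):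
--     _group_ind = {'ir': 4, 'ov': 21}
--
--     def _key(_filename):
--         return 0 if _group == 'all' else int(_filename[_group_ind[_group]])
--
--     _keys = [_key(_filename) for _filename in _pred_file_list]
--     return {_k: [_filename for _filename, _j in zip(_pred_file_list, _keys) if _j == _k]
--             for _k in dict.fromkeys(_keys)}
-- ===== Notes on version B (the rewrite author's own statement) =====
-- stated objective: alternative
-- what changed: A builds the dict incrementally in one hashing pass (membership test + append per file); B computes all keys once, deduplicates them in first-occurrence order with dict.fromkeys, and builds each group by a per-key filtering comprehension over the zipped list.
import Mathlib
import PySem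

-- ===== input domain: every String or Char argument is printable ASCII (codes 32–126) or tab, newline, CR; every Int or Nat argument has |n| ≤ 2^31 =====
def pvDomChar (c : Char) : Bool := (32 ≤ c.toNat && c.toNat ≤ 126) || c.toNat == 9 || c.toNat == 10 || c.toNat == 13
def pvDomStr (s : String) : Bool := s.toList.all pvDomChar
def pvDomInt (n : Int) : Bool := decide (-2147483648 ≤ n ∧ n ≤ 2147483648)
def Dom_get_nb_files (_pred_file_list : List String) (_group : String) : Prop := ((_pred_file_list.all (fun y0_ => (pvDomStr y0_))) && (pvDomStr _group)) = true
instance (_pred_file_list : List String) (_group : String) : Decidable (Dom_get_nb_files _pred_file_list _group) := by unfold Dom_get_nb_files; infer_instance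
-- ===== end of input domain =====

-- B replaces A's incremental dict-building pass by dedup-of-keys + per-key filtering (alternative decomposition, same results).


-- shared key computation: 0 for 'all', else int(filename[{'ir':4,'ov':21}[group]]); getD 0 is never
-- reached under Pre_ (Python raises exactly where the option is none)
def pvKey (_group : String) (_filename : String) : Int :=
  if _group == "all" then 0
  else ((((PySem.Dict.ofList [("ir", (4 : Int)), ("ov", (21 : Int))]).get? _group).bind
          (fun i => (PySem.Str.pyGet? _filename i).bind
            (fun c => PySem.Int.ofChars? [c]))).getD 0)

-- ===== PORT A =====
def get_nb_files (_pred_file_list : List String) (_group : String) : List (Int × List String) :=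
  (_pred_file_list.foldl
    (fun _cnt_dict _filename =>
      let _ind := pvKey _group _filename
      let _cnt_dict := if _cnt_dict.contains _ind then _cnt_dict else _cnt_dict.insert _ind ([] : List String)
      _cnt_dict.modify _ind [] (fun v => v ++ [_filename]))
    PySem.Dict.empty).items

-- ===== PORT B =====
def get_nb_files_alt (_pred_file_list : List String) (_group : String) : List (Int × List String) :=
  let _keys := _pred_file_list.map (pvKey _group)
  (PySem.List.dedup _keys).map
    (fun _k => (_k, ((_pred_file_list.zip _keys).filter (fun p => p.2 == _k)).map (fun p => p.1)))

-- ===== PRECONDITION & SPEC =====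
-- true iff position n of f exists and holds an ASCII digit (where Python's int(f[n]) succeeds)
def pvDigitAt (f : String) (n : Nat) : Bool := (f.toList[n]?.map Char.isDigit).getD false
-- exactly where Python A returns: empty list (loop never runs), group 'all', or group 'ir'/'ov'
-- with every filename long enough and holding a digit at the indexed position; elsewhere A raises
-- (KeyError / IndexError / ValueError).
def Pre_get_nb_files (_pred_file_list : List String) (_group : String) : Prop :=
  _pred_file_list = [] ∨ _group = "all" ∨
  (_group = "ir" ∧ ∀ f ∈ _pred_file_list, pvDigitAt f 4 = true) ∨
  (_group = "ov" ∧ ∀ f ∈ _pred_file_list, pvDigitAt f 21 = true)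
instance (_pred_file_list : List String) (_group : String) : Decidable (Pre_get_nb_files _pred_file_list _group) := by unfold Pre_get_nb_files; infer_instance
def pvWitness_get_nb_files : List String × String := (["abcd5", "xyzw1bc"], "ir")
def Spec_get_nb_files (_pred_file_list : List String) (_group : String) (out : List (Int × List String)) : Prop := out = get_nb_files_alt _pred_file_list _group
instance (_pred_file_list : List String) (_group : String) (out : List (Int × List String)) : Decidable (Spec_get_nb_files _pred_file_list _group out) := by unfold Spec_get_nb_files; infer_instance

-- ===== CLAIM (what is proved, stated in full; the proofs are below) =====
def Claim_equal_get_nb_files : Prop := ∀ (_pred_file_list : List String) (_group : String), Dom_get_nb_files _pred_file_list _group → Pre_get_nb_files _pred_file_list _group → Spec_get_nb_files _pred_file_list _group (get_nb_files _pred_file_list _group)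

-- ===== LEMMAS AND PROOFS =====

theorem pv_zip_map_self (h : String → Int) : ∀ (l : List String),
    l.zip (l.map h) = l.map (fun f => (f, h f))
  | [] => rfl
  | a :: t => by simp [pv_zip_map_self h t]

-- A's loop body (setdefault-style guard + append) is one Dict.modify
theorem pv_stepA_eq (g : String) (d : PySem.Dict Int (List String)) (f : String) :
    (let _ind := pvKey g f
     let d' := if d.contains _ind then d else d.insert _ind ([] : List String)
     d'.modify _ind [] (fun v => v ++ [f]))
    = d.modify (pvKey g f) [] (fun v => v ++ [f]) := by
  cases h : d.contains (pvKey g f) with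
  | true => simp [h]
  | false =>
      simp only [h, Bool.false_eq_true, if_false, PySem.Dict.modify,
        PySem.Dict.getD_insert_self, PySem.Dict.insert_insert_self]
      rw [PySem.Dict.getD_of_not_contains]
      exact h

theorem pv_eq (l : List String) (g : String) :
    get_nb_files l g = get_nb_files_alt l g := by
  unfold get_nb_files get_nb_files_alt
  have h1 : (l.foldl
      (fun d f =>
        let _ind := pvKey g f
        let d' := if d.contains _ind then d else d.insert _ind ([] : List String)
        d'.modify _ind [] (fun v => v ++ [f]))
      PySem.Dict.empty)
      = (l.map (fun f => (pvKey g f, f))).foldl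
          (fun d p => d.modify p.1 [] (fun v => v ++ [p.2])) PySem.Dict.empty := by
    rw [List.foldl_map]
    have hfun : (fun (d : PySem.Dict Int (List String)) (f : String) =>
        let _ind := pvKey g f
        let d' := if d.contains _ind then d else d.insert _ind ([] : List String)
        d'.modify _ind [] (fun v => v ++ [f]))
        = fun d f => d.modify (pvKey g f) [] (fun v => v ++ [f]) :=
      funext fun d => funext fun f => pv_stepA_eq g d f
    rw [hfun]
  rw [h1]
  set L := l.map (fun f => (pvKey g f, f)) with hL
  have hkeys : ((L.foldl (fun d p => d.modify p.1 [] (fun v => v ++ [p.2])) PySem.Dict.empty).keys)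
      = PySem.List.dedup (l.map (pvKey g)) := by
    rw [PySem.Dict.keys_foldl_modify_key L Prod.fst ([] : List String)
          (fun _ p v => v ++ [p.2]) PySem.Dict.empty]
    rw [PySem.List.dedup_eq_ofList, PySem.Dict.keys_empty, PySem.Set.update_nil_left, hL,
      List.map_map]
    rfl
  have hnd : ((L.foldl (fun d p => d.modify p.1 [] (fun v => v ++ [p.2])) PySem.Dict.empty).keys).Nodup := by
    exact PySem.Dict.nodup_keys_foldl_modify_key L Prod.fst ([] : List String)
      (fun _ p v => v ++ [p.2]) PySem.Dict.empty (by simp [PySem.Dict.keys_empty])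
  rw [PySem.Dict.items_eq_map_keys _ hnd ([] : List String), hkeys]
  apply List.map_congr_left
  intro k _
  have hv : (L.foldl (fun d p => d.modify p.1 [] (fun v => v ++ [p.2])) PySem.Dict.empty).getD k []
      = (l.filter (fun f => pvKey g f == k)) := by
    rw [PySem.Dict.getD_foldl_modify_append, PySem.Dict.getD_empty, hL, List.filter_map,
      List.map_map]
    simp [Function.comp_def]
  have hzip := pv_zip_map_self (pvKey g) l
  rw [hv, hzip, List.filter_map, List.map_map]
  simp [Function.comp_def]

-- ===== VERDICT (by name: the statement is the Claim_ definition above) =====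
theorem get_nb_files_spec : Claim_equal_get_nb_files := by
  intro l g _ _
  unfold Spec_get_nb_files
  exact pv_eq l g
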